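-- pv_equiv track=rewrite | github.com/vanicat/advant-soluce-python | soluce13.py | convert
-- ===== SOURCE A (Python) =====
-- def convert(cur_list:list[str]) -> tuple[list[int], list[int]]:
--     cols = []
--     lines = [0 for _ in cur_list[0]]
--     for line in cur_list:
--         cur = 0
--         for i, c in enumerate(line):
--             lines[i] *= 2
--             cur *= 2
--             if c == "#":
--                     lines[i] += 1
--                     cur += 1
--         cols.append(cur)
--     return lines, cols
-- ===== SOURCE B (Python) =====
-- def convert(cur_list: list[str]) -> tuple[list[int], list[int]]:
--     # Build transposed binary strings for the columns and binary strings for the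
--     # rows, then parse them with int(..., 2), instead of A's interleaved
--     # arithmetic accumulators.
--     col_bits = [''] * len(cur_list[0])
--     for line in cur_list:
--         for j, c in enumerate(line):
--             col_bits[j] += '1' if c == '#' else '0'
--     lines = [int(b, 2) for b in col_bits]
--     cols = [int(''.join('1' if c == '#' else '0' for c in line), 2) if line else 0
--             for line in cur_list]
--     return lines, cols
-- ===== Notes on version B (the rewrite author's own statement) =====
-- stated objective: alternative
-- what changed: A interleaves row and column masks in one row-major pass with arithmetic accumulators (lines[i] = lines[i]*2 + bit, cur = cur*2 + bit); B instead builds transposed binary strings for the columns and a binary string per row and parses them with int(..., 2).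
import Mathlib
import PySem

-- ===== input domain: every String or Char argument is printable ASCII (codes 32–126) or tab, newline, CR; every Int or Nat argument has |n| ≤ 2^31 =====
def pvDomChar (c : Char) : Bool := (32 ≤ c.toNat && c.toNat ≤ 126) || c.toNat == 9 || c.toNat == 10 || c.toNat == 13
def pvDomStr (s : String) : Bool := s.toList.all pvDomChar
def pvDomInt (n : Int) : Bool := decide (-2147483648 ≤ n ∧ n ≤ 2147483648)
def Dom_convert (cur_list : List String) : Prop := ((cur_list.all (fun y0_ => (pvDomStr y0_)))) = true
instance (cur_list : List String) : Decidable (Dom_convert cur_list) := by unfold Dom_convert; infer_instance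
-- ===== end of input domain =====

-- B replaces A's single interleaved arithmetic pass by transposed binary strings
-- plus base-2 parsing (objective: alternative).

-- ===== PORT A =====
-- inner loop of A: "for i, c in enumerate(line)" threading (lines, cur) with counter i
def convertRowA (lines : List Int) (cur : Int) (i : Nat) (cs : List Char) : List Int × Int :=
  match cs with
  | [] => (lines, cur)
  | c :: rest =>
    let v := lines.getD i 0 * 2 + (if c = '#' then 1 else 0)
    let cur' := cur * 2 + (if c = '#' then 1 else 0)
    convertRowA (lines.set i v) cur' (i + 1) rest

def convert (cur_list : List String) : List Int × List Int :=
  let lines0 : List Int := (cur_list.headD "").toList.map (fun _ => 0)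
  let st := cur_list.foldl
    (fun (st : List Int × List Int) s =>
      let r := convertRowA st.1 0 0 s.toList
      (r.1, st.2 ++ [r.2])) (lines0, ([] : List Int))
  (st.1, st.2)

-- ===== PORT B =====
-- int(b, 2): exact for strings of '0'/'1' digits, the only strings Source B parses
def int2 (cs : List Char) : Int :=
  cs.foldl (fun a c => a * 2 + (if c = '1' then 1 else 0)) 0

-- inner loop of B: "for j, c in enumerate(line): col_bits[j] += '1' if c == '#' else '0'"
def colAppendB (cb : List (List Char)) (j : Nat) (cs : List Char) : List (List Char) :=
  match cs with
  | [] => cb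
  | c :: rest =>
    colAppendB (cb.set j (cb.getD j [] ++ [if c = '#' then '1' else '0'])) (j + 1) rest

def convert_alt (cur_list : List String) : List Int × List Int :=
  let colBits := cur_list.foldl (fun cb s => colAppendB cb 0 s.toList)
    (List.replicate (cur_list.headD "").toList.length ([] : List Char))
  (colBits.map int2,
   cur_list.map (fun s =>
     if s.toList.isEmpty then 0
     else int2 (s.toList.map (fun c => if c = '#' then '1' else '0'))))

-- ===== PRECONDITION & SPEC =====
-- Pre_ excludes exactly the inputs where A raises IndexError: the empty list
-- (cur_list[0]) and lists with a line longer than the first (lines[i] out of range).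
def Pre_convert (cur_list : List String) : Prop :=
  cur_list ≠ [] ∧ ∀ s ∈ cur_list, s.toList.length ≤ (cur_list.headD "").toList.length
instance (cur_list : List String) : Decidable (Pre_convert cur_list) := by
  unfold Pre_convert; infer_instance
def pvWitness_convert : List String := ["#.", ".#"]

def Spec_convert (cur_list : List String) (out : List Int × List Int) : Prop := out = convert_alt cur_list
instance (cur_list : List String) (out : List Int × List Int) : Decidable (Spec_convert cur_list out) := by unfold Spec_convert; infer_instance

-- ===== CLAIM (what is proved, stated in full; the proofs are below) =====
def Claim_equal_convert : Prop := ∀ (cur_list : List String), Dom_convert cur_list → Pre_convert cur_list → Spec_convert cur_list (convert cur_list)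

-- ===== LEMMAS AND PROOFS =====
theorem convertRowA_length (cs : List Char) : ∀ (L : List Int) (cur : Int) (i : Nat),
    (convertRowA L cur i cs).1.length = L.length := by
  induction cs with
  | nil => intro L cur i; simp [convertRowA]
  | cons c rest ih => intro L cur i; simp [convertRowA, ih]

theorem convertRowA_snd (cs : List Char) : ∀ (L : List Int) (cur : Int) (i : Nat),
    (convertRowA L cur i cs).2 =
      cs.foldl (fun a c => a * 2 + (if c = '#' then 1 else 0)) cur := by
  induction cs with
  | nil => intro L cur i; simp [convertRowA]
  | cons c rest ih => intro L cur i; simp [convertRowA, ih]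

theorem convertRowA_fst_getD (cs : List Char) : ∀ (L : List Int) (cur : Int) (i j : Nat),
    i + cs.length ≤ L.length →
    (convertRowA L cur i cs).1.getD j 0 =
      if i ≤ j ∧ j < i + cs.length then
        L.getD j 0 * 2 + (if cs.getD (j - i) ' ' = '#' then 1 else 0)
      else L.getD j 0 := by
  induction cs with
  | nil => intro L cur i j h; simp [convertRowA]
  | cons c rest ih =>
    intro L cur i j h
    simp only [convertRowA]
    have h' : i + 1 + rest.length ≤ L.length := by simp only [List.length_cons] at h; omega
    rw [ih _ _ (i + 1) j (by simpa using h')]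
    by_cases hji : j = i
    · have hiL : i < L.length := by omega
      have hcond : i ≤ i ∧ i < i + (c :: rest).length := ⟨le_rfl, by simp only [List.length_cons]; omega⟩
      rw [hji, if_neg (by omega), if_pos hcond]
      simp [List.getD, List.getElem?_set_self hiL]
    · rw [List.getD, List.getElem?_set_ne (by omega), ← List.getD]
      by_cases h1 : i + 1 ≤ j ∧ j < i + 1 + rest.length
      · have : i ≤ j ∧ j < i + (c :: rest).length := by simp; omega
        rw [if_pos h1, if_pos this]
        have hji' : j - i = (j - (i + 1)) + 1 := by omega
        simp [hji']
      · have : ¬ (i ≤ j ∧ j < i + (c :: rest).length) := by simp; omega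
        rw [if_neg h1, if_neg this]

-- outer loop invariant of A: the final state splits into the column fold and the
-- accumulated per-row Horner values
theorem outerA (rows : List String) : ∀ (L : List Int) (acc : List Int),
    (rows.foldl
      (fun (st : List Int × List Int) s =>
        let r := convertRowA st.1 0 0 s.toList
        (r.1, st.2 ++ [r.2])) (L, acc)) =
      ((rows.foldl
          (fun (M : List Int) s => (convertRowA M 0 0 s.toList).1) L),
       acc ++ rows.map (fun s =>
          s.toList.foldl (fun a c => a * 2 + (if c = '#' then 1 else 0)) 0)) := by
  induction rows with
  | nil => intro L acc; simp
  | cons s rest ih =>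
    intro L acc
    simp only [List.foldl_cons, List.map_cons]
    rw [ih]
    simp [convertRowA_snd]

theorem foldA_length (rows : List String) : ∀ (L : List Int),
    (rows.foldl (fun (M : List Int) s => (convertRowA M 0 0 s.toList).1) L).length
      = L.length := by
  induction rows with
  | nil => intro L; simp
  | cons s rest ih => intro L; simp only [List.foldl_cons]; rw [ih, convertRowA_length]

theorem foldA_getD (rows : List String) : ∀ (L : List Int) (j : Nat),
    (∀ s ∈ rows, s.toList.length ≤ L.length) →
    (rows.foldl (fun (M : List Int) s => (convertRowA M 0 0 s.toList).1) L).getD j 0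
      = rows.foldl
          (fun col s =>
            if j < s.toList.length then col * 2 + (if s.toList.getD j ' ' = '#' then 1 else 0)
            else col) (L.getD j 0) := by
  induction rows with
  | nil => intro L j _; simp
  | cons s rest ih =>
    intro L j h
    simp only [List.foldl_cons]
    rw [ih _ j (by intro t ht; rw [convertRowA_length]; exact h t (by simp [ht]))]
    congr 1
    rw [convertRowA_fst_getD _ _ _ _ _ (by simpa using h s (by simp))]
    simp

-- the same three lemmas for B's inner loop over col_bits
theorem colAppendB_length (cs : List Char) : ∀ (cb : List (List Char)) (j : Nat),
    (colAppendB cb j cs).length = cb.length := by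
  induction cs with
  | nil => intro cb j; simp [colAppendB]
  | cons c rest ih => intro cb j; simp [colAppendB, ih]

theorem colAppendB_getD (cs : List Char) : ∀ (cb : List (List Char)) (i j : Nat),
    i + cs.length ≤ cb.length →
    (colAppendB cb i cs).getD j [] =
      if i ≤ j ∧ j < i + cs.length then
        cb.getD j [] ++ [if cs.getD (j - i) ' ' = '#' then '1' else '0']
      else cb.getD j [] := by
  induction cs with
  | nil => intro cb i j h; simp [colAppendB]
  | cons c rest ih =>
    intro cb i j h
    simp only [colAppendB]
    have h' : i + 1 + rest.length ≤ cb.length := by simp only [List.length_cons] at h; omega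
    rw [ih _ (i + 1) j (by simpa using h')]
    by_cases hji : j = i
    · have hiL : i < cb.length := by omega
      have hcond : i ≤ i ∧ i < i + (c :: rest).length := ⟨le_rfl, by simp only [List.length_cons]; omega⟩
      rw [hji, if_neg (by omega), if_pos hcond]
      simp [List.getD, List.getElem?_set_self hiL]
    · rw [List.getD, List.getElem?_set_ne (by omega), ← List.getD]
      by_cases h1 : i + 1 ≤ j ∧ j < i + 1 + rest.length
      · have : i ≤ j ∧ j < i + (c :: rest).length := by simp; omega
        rw [if_pos h1, if_pos this]
        have hji' : j - i = (j - (i + 1)) + 1 := by omega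
        simp [hji']
      · have : ¬ (i ≤ j ∧ j < i + (c :: rest).length) := by simp; omega
        rw [if_neg h1, if_neg this]

theorem foldB_length (rows : List String) : ∀ (cb : List (List Char)),
    (rows.foldl (fun cb s => colAppendB cb 0 s.toList) cb).length = cb.length := by
  induction rows with
  | nil => intro cb; simp
  | cons s rest ih => intro cb; simp only [List.foldl_cons]; rw [ih, colAppendB_length]

theorem foldB_getD (rows : List String) : ∀ (cb : List (List Char)) (j : Nat),
    (∀ s ∈ rows, s.toList.length ≤ cb.length) →
    (rows.foldl (fun cb s => colAppendB cb 0 s.toList) cb).getD j []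
      = rows.foldl
          (fun bits s =>
            if j < s.toList.length then bits ++ [if s.toList.getD j ' ' = '#' then '1' else '0']
            else bits) (cb.getD j []) := by
  induction rows with
  | nil => intro cb j _; simp
  | cons s rest ih =>
    intro cb j h
    simp only [List.foldl_cons]
    rw [ih _ j (by intro t ht; rw [colAppendB_length]; exact h t (by simp [ht]))]
    congr 1
    rw [colAppendB_getD _ _ _ _ (by simpa using h s (by simp))]
    simp

theorem int2_append (bs : List Char) (b : Char) :
    int2 (bs ++ [b]) = int2 bs * 2 + (if b = '1' then 1 else 0) := by
  simp [int2, List.foldl_append]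

-- A's guarded integer Horner fold equals int2 of B's guarded bit-string fold
theorem foldInt_eq_int2_foldBits (rows : List String) : ∀ (j : Nat) (a : Int) (bs : List Char),
    a = int2 bs →
    rows.foldl
        (fun col s =>
          if j < s.toList.length then col * 2 + (if s.toList.getD j ' ' = '#' then 1 else 0)
          else col) a
      = int2 (rows.foldl
          (fun bits s =>
            if j < s.toList.length then bits ++ [if s.toList.getD j ' ' = '#' then '1' else '0']
            else bits) bs) := by
  induction rows with
  | nil => intro j a bs h; simpa using h
  | cons s rest ih =>
    intro j a bs h
    simp only [List.foldl_cons]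
    by_cases hs : j < s.toList.length
    · rw [if_pos hs, if_pos hs]
      refine ih j _ _ ?_
      rw [int2_append, h]
      by_cases hc : s.toList.getD j ' ' = '#'
      · simp [hc]
      · simp [hc]
    · rw [if_neg hs, if_neg hs]
      exact ih j a bs h

-- A's per-row Horner fold equals int2 of the row's translated bit string
theorem rowHorner_eq_int2 (cs : List Char) : ∀ (a : Int),
    cs.foldl (fun a c => a * 2 + (if c = '#' then 1 else 0)) a
      = (cs.map (fun c => if c = '#' then '1' else '0')).foldl
          (fun a c => a * 2 + (if c = '1' then 1 else 0)) a := by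
  induction cs with
  | nil => intro a; simp
  | cons c rest ih =>
    intro a
    simp only [List.foldl_cons, List.map_cons]
    rw [ih]
    by_cases hc : c = '#' <;> simp [hc]

-- ===== VERDICT (by name: the statement is the Claim_ definition above) =====
theorem convert_spec : Claim_equal_convert := by
  intro cur_list _ hpre
  unfold Spec_convert
  obtain ⟨hne, hlen⟩ := hpre
  simp only [convert, convert_alt]
  have hn : ((cur_list.headD "").toList.map (fun _ => (0:Int))).length
      = (cur_list.headD "").toList.length := by simp
  have hn' : (List.replicate (cur_list.headD "").toList.length ([] : List Char)).length
      = (cur_list.headD "").toList.length := by simp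
  rw [outerA]
  refine Prod.ext ?_ ?_
  · apply List.ext_getElem
    · rw [foldA_length, hn]
      simp [foldB_length]
    · intro i h1 h2
      rw [← List.getD_eq_getElem _ 0 h1, ← List.getD_eq_getElem _ 0 h2]
      rw [foldA_getD _ _ _ (by intro s hs; rw [hn]; exact hlen s hs)]
      have h0 : ((cur_list.headD "").toList.map (fun _ => (0:Int))).getD i 0 = 0 := by
        simp [List.getD]
      rw [h0]
      have hi : i < (cur_list.foldl (fun cb s => colAppendB cb 0 s.toList)
          (List.replicate (cur_list.headD "").toList.length ([] : List Char))).length := by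
        simpa using h2
      show _ = ((cur_list.foldl (fun cb s => colAppendB cb 0 s.toList)
          (List.replicate (cur_list.headD "").toList.length ([] : List Char))).map int2).getD i 0
      rw [List.getD, List.getElem?_map,
        List.getElem?_eq_getElem (by simpa using hi), Option.map_some, Option.getD_some,
        ← List.getD_eq_getElem _ ([] : List Char) hi]
      rw [foldB_getD _ _ _ (by intro s hs; rw [hn']; exact hlen s hs)]
      have h0' : (List.replicate (cur_list.headD "").toList.length ([] : List Char)).getD i []
          = [] := by simp [List.getD]
      rw [h0']
      exact foldInt_eq_int2_foldBits cur_list i 0 [] (by simp [int2])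
  · simp only [List.nil_append]
    refine List.map_congr_left (fun s _ => ?_)
    by_cases hs : s.toList.isEmpty
    · simp [List.isEmpty_iff.mp hs]
    · rw [if_neg hs, int2, rowHorner_eq_int2]
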